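-- pv_equiv track=rewrite | github.com/claudlos/Kryptos | kryptos/transposition.py | existing_cells
-- ===== SOURCE A (Python) =====
-- from math import ceil
--
-- def existing_cells(length: int, width: int) -> list[tuple[int, int]]:
--     rows = ceil(length / width)
--     cells: list[tuple[int, int]] = []
--     for row in range(rows):
--         row_width = width if row < rows - 1 or length % width == 0 else length % width
--         for column in range(row_width):
--             cells.append((row, column))
--     return cells
-- ===== SOURCE B (Python) =====
-- def existing_cells(length: int, width: int) -> list[tuple[int, int]]:
--     if width <= 0:
--         return []
--     return [divmod(i, width) for i in range(length)]
-- ===== Notes on version B (the rewrite author's own statement) =====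
-- stated objective: simpler
-- what changed: Replaces the ceil row count and the nested row/column loops with one flat comprehension [divmod(i, width) for i in range(length)], guarded by width <= 0 (where A yields no cells).
import Mathlib
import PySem

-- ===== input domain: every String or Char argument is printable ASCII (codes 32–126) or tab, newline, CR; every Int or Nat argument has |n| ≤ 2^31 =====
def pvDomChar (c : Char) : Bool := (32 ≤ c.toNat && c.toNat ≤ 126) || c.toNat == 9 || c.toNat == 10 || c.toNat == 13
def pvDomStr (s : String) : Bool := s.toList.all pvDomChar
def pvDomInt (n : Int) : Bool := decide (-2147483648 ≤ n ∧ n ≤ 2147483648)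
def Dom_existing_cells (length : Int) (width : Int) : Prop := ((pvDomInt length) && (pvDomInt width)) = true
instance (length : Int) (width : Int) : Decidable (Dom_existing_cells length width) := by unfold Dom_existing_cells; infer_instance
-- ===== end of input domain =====

-- B replaces A's ceil row count and nested row/column loops by one flat divmod
-- enumeration (objective: simpler); on width == 0, outside Pre_, A raises
-- ZeroDivisionError while B returns [].

-- ===== PORT A =====
-- rows = ceil(length / width) is ported as the integer ceiling -((-length) // width):
-- exact for Python's float true division here because |length| ≤ 2^31 < 2^53 on Dom,
-- so the rounded quotient never crosses an integer.
def existing_cells (length : Int) (width : Int) : List (Int × Int) :=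
  let rows := -(PySem.Int.floordiv (-length) width)
  (PySem.List.pyRange 0 rows 1).foldl (fun cells row =>
    let row_width := if row < rows - 1 ∨ PySem.Int.mod length width = 0 then width
                     else PySem.Int.mod length width
    (PySem.List.pyRange 0 row_width 1).foldl (fun cells column => cells ++ [(row, column)]) cells) []

-- ===== PORT B =====
-- divmod(i, width) with width > 0 never raises: it is (i // width, i % width)
def existing_cells_alt (length : Int) (width : Int) : List (Int × Int) :=
  if width ≤ 0 then []
  else (PySem.List.pyRange 0 length 1).map
    (fun i => (PySem.Int.floordiv i width, PySem.Int.mod i width))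

-- ===== PRECONDITION & SPEC =====
-- Pre_ excludes exactly width == 0, where A raises ZeroDivisionError (length / width).
def Pre_existing_cells (length : Int) (width : Int) : Prop := width ≠ 0
instance (length : Int) (width : Int) : Decidable (Pre_existing_cells length width) := by
  unfold Pre_existing_cells; infer_instance
def pvWitness_existing_cells : Int × Int := (5, 2)

def Spec_existing_cells (length : Int) (width : Int) (out : List (Int × Int)) : Prop :=
  out = existing_cells_alt length width
instance (length : Int) (width : Int) (out : List (Int × Int)) : Decidable (Spec_existing_cells length width out) := by
  unfold Spec_existing_cells; infer_instance

-- ===== CLAIM (what is proved, stated in full; the proofs are below) =====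
def Claim_equal_existing_cells : Prop := ∀ (length : Int) (width : Int),
  Dom_existing_cells length width → Pre_existing_cells length width →
  Spec_existing_cells length width (existing_cells length width)

-- ===== LEMMAS AND PROOFS =====

lemma rowMap (q t w : Int) (hw : 0 < w) (ht : t ≤ w) :
    (PySem.List.pyRange (q*w) (q*w + t) 1).map
        (fun i => (PySem.Int.floordiv i w, PySem.Int.mod i w))
      = (PySem.List.pyRange 0 t 1).map (fun c => (q, c)) := by
  rw [PySem.List.pyRange_one, PySem.List.pyRange_one]
  simp only [add_sub_cancel_left, sub_zero, List.map_map]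
  apply List.map_congr_left
  intro j hj
  simp only [List.mem_range] at hj
  have hjt : (j : Int) < t := Int.lt_toNat.mp hj
  have hj0 : (0:Int) ≤ (j:Int) := Int.natCast_nonneg j
  have hfd : PySem.Int.floordiv (q*w + (j:Int)) w = q := by
    rw [PySem.Int.floordiv_eq_iff_of_pos hw]
    constructor
    · linarith
    · have : (q+1)*w = q*w + w := by ring
      rw [this]; linarith
  have hmod : PySem.Int.mod (q*w + (j:Int)) w = (j:Int) := by
    have h := PySem.Int.floordiv_mul_add_mod (q*w + (j:Int)) w
    rw [hfd] at h; linarith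
  simp [Function.comp, hfd, hmod]

lemma gridMap (k : Nat) (w : Int) (hw : 0 < w) :
    (PySem.List.pyRange 0 ((k : Int) * w) 1).map
        (fun i => (PySem.Int.floordiv i w, PySem.Int.mod i w))
      = (PySem.List.pyRange 0 (k : Int) 1).flatMap
          (fun row => (PySem.List.pyRange 0 w 1).map (fun c => (row, c))) := by
  induction k with
  | zero => simp [PySem.List.pyRange_one_eq_nil]
  | succ k ih =>
    have hk0 : (0:Int) ≤ (k:Int) * w := by positivity
    have hsplit : PySem.List.pyRange 0 (((k+1 : Nat) : Int) * w) 1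
        = PySem.List.pyRange 0 ((k:Int)*w) 1 ++ PySem.List.pyRange ((k:Int)*w) ((k:Int)*w + w) 1 := by
      have h1 : ((k+1 : Nat) : Int) * w = (k:Int)*w + w := by push_cast; ring
      rw [h1, PySem.List.pyRange_one_append 0 ((k:Int)*w) ((k:Int)*w + w) hk0 (by linarith)]
    have hrows : PySem.List.pyRange 0 ((k+1 : Nat) : Int) 1
        = PySem.List.pyRange 0 (k:Int) 1 ++ [(k:Int)] := by
      have h1 : ((k+1 : Nat) : Int) = (k:Int) + 1 := by push_cast; ring
      rw [h1, PySem.List.pyRange_one_succ_right (Int.natCast_nonneg k)]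
    rw [hsplit, hrows, List.map_append, List.flatMap_append, ih,
        rowMap (k:Int) w w hw le_rfl]
    simp

theorem ports_eq (l w : Int) (hw : w ≠ 0) :
    (let rows := -(PySem.Int.floordiv (-l) w)
     (PySem.List.pyRange 0 rows 1).foldl (fun cells row =>
       let row_width := if row < rows - 1 ∨ PySem.Int.mod l w = 0 then w
                        else PySem.Int.mod l w
       (PySem.List.pyRange 0 row_width 1).foldl (fun cells column => cells ++ [(row, column)]) cells) [])
    = (if w ≤ 0 then []
       else (PySem.List.pyRange 0 l 1).map
         (fun i => (PySem.Int.floordiv i w, PySem.Int.mod i w))) := by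
  simp only [PySem.List.foldl_append_singleton_eq_map, PySem.List.foldl_append_eq_flatMap,
    List.nil_append]
  set rows := -(PySem.Int.floordiv (-l) w) with hrowsdef
  rcases lt_or_gt_of_ne hw with hneg | hpos
  · rw [if_pos (le_of_lt hneg)]
    rw [List.flatMap_congr (g := fun _ : Int => ([] : List (Int × Int))) ?_]
    · simp
    · intro row _
      have hm := PySem.Int.mod_neg_bounds l hneg
      split
      · rw [PySem.List.pyRange_one_eq_nil (le_of_lt hneg)]; simp
      · rw [PySem.List.pyRange_one_eq_nil hm.2]; simp
  · rw [if_neg (not_le.mpr hpos)]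
    by_cases hl : l ≤ 0
    · have hfd : 0 ≤ PySem.Int.floordiv (-l) w := by
        rw [PySem.Int.floordiv_eq_ediv_of_pos hpos]
        exact Int.ediv_nonneg (by omega) (le_of_lt hpos)
      rw [PySem.List.pyRange_one_eq_nil (show rows ≤ 0 by omega),
          PySem.List.pyRange_one_eq_nil hl]
      simp
    · rw [not_le] at hl
      have hbr : (rows - 1) * w < l ∧ l ≤ rows * w :=
        (PySem.Int.neg_floordiv_neg_eq_iff_of_pos hpos).mp rfl
      have hrows1 : 1 ≤ rows := by nlinarith [hbr.2]
      set t := l - (rows - 1) * w with htdef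
      have ht0 : 0 < t := by linarith [hbr.1]
      have htw : t ≤ w := by nlinarith [hbr.2]
      clear_value rows t
      have hAsplit : PySem.List.pyRange 0 rows 1
          = PySem.List.pyRange 0 (rows - 1) 1 ++ [rows - 1] := by
        have hs : PySem.List.pyRange (rows - 1) rows 1 = [rows - 1] := by
          have h := PySem.List.pyRange_one_singleton (rows - 1)
          rwa [show rows - 1 + 1 = rows by ring] at h
        rw [PySem.List.pyRange_one_append 0 (rows - 1) rows (by omega) (by omega), hs]
      have hBsplit : PySem.List.pyRange 0 l 1
          = PySem.List.pyRange 0 ((rows - 1) * w) 1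
            ++ PySem.List.pyRange ((rows - 1) * w) ((rows - 1) * w + t) 1 := by
        rw [show (rows - 1) * w + t = l by linarith]
        exact PySem.List.pyRange_one_append 0 ((rows - 1) * w) l
          (mul_nonneg (by omega) (le_of_lt hpos)) (by linarith [hbr.1])
      rw [hAsplit, hBsplit, List.flatMap_append, List.map_append]
      congr 1
      · rw [List.flatMap_congr
            (g := fun row => (PySem.List.pyRange 0 w 1).map (fun c => (row, c))) ?_]
        · have hk : ((rows - 1).toNat : Int) = rows - 1 := Int.toNat_of_nonneg (by omega)
          have hg := gridMap (rows - 1).toNat w hpos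
          rw [hk] at hg
          exact hg.symm
        · intro row hrow
          rw [PySem.List.mem_pyRange_one] at hrow
          rw [if_pos (Or.inl hrow.2)]
      · rw [rowMap (rows - 1) t w hpos htw]
        have hlast : (if rows - 1 < rows - 1 ∨ PySem.Int.mod l w = 0 then w
                      else PySem.Int.mod l w) = t := by
          have hfm := PySem.Int.floordiv_mul_add_mod l w
          by_cases hm : PySem.Int.mod l w = 0
          · rw [if_pos (Or.inr hm)]
            rw [hm, add_zero] at hfm
            have h1 : rows - 1 < PySem.Int.floordiv l w :=
              lt_of_mul_lt_mul_right (by linarith [hbr.1]) (le_of_lt hpos)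
            have h2 : PySem.Int.floordiv l w ≤ rows :=
              le_of_mul_le_mul_right (by linarith [hbr.2]) hpos
            have hfr : PySem.Int.floordiv l w = rows := by omega
            rw [hfr] at hfm
            have hrw : rows * w - (rows - 1) * w = w := by ring
            linarith
          · rw [if_neg (by simp [hm])]
            have hlt : l < rows * w := by
              rcases lt_or_eq_of_le hbr.2 with h | h
              · exact h
              · exact absurd ((PySem.Int.mod_eq_zero_iff_dvd l w).mpr ⟨rows, by linarith⟩) hm
            have hfdl : PySem.Int.floordiv l w = rows - 1 := by
              rw [PySem.Int.floordiv_eq_iff_of_pos hpos]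
              exact ⟨by linarith, by rw [show (rows - 1 + 1) * w = rows * w by ring]; exact hlt⟩
            rw [hfdl] at hfm
            linarith
        simp only [List.flatMap_cons, List.flatMap_nil, List.append_nil]
        rw [hlast]

-- ===== VERDICT (by name: the statement is the Claim_ definition above) =====
theorem existing_cells_spec : Claim_equal_existing_cells := by
  intro l w _ hp
  show existing_cells l w = existing_cells_alt l w
  unfold existing_cells existing_cells_alt
  exact ports_eq l w hp
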